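-- pv_equiv track=rewrite | github.com/jateen67/tradingbot | main.py | has_dog_ticker
-- ===== SOURCE A (Python) =====
-- def has_dog_ticker(s):
--     for i in range(len(s)):
--         if s[i: i + 3].lower() == 'dog':
--             for j in range(i + 1):
--                 if s[i - j - 1] == '@':
--                     break
--                 elif i - j == 0 or s[i - j - 1] == ' ':
--                     return True
--
--     return False
-- ===== SOURCE B (Python) =====
-- def has_dog_ticker(s):
--     t = s.lower()
--     last_at = -1
--     last_space = -1
--     for i in range(len(t)):
--         if t[i:i + 3] == 'dog' and last_at <= last_space:
--             return True
--         c = t[i]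
--         if c == '@':
--             last_at = i
--         elif c == ' ':
--             last_space = i
--     return False
-- ===== Notes on version B (the rewrite author's own statement) =====
-- stated objective: alternative
-- what changed: Replaced A's backward inner scan per 'dog' occurrence by a single forward pass over the lowercased string that tracks the positions of the last '@' and last space seen, deciding each 'dog' occurrence in O(1) from that state.
-- intended difference: On strings ending in '@' whose only word-initial 'dog' occurrence is in a word that starts at index 0 (and no space-preceded occurrence exists), A's backward scan evaluates s[-1], wraps to the final '@' and returns False; B returns True, which is intended since that trailing '@' is not in the word containing 'dog'. — e.g. on has_dog_ticker("dog@"): A returns false, B returns true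
import Mathlib
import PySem

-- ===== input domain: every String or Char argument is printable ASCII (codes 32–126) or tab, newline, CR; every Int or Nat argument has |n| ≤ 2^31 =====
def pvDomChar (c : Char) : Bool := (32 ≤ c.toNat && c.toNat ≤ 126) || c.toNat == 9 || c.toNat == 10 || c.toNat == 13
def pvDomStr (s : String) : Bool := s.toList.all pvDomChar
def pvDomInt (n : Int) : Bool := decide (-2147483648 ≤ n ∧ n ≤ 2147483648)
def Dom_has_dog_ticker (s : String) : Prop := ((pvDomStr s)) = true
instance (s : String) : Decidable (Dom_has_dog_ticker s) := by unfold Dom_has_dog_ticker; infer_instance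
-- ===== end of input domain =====

-- B replaces A's per-occurrence backward rescan by a single forward pass tracking the last '@' and last ' ' positions.
-- ===== PORT A =====
-- inner loop 'for j in range(i + 1)': returns true = Python 'return True', false = 'break' or loop exhaustion (continue outer)
def pvAInner (l : List Char) (i : Int) : List Int → Bool
  | [] => false
  | j :: js =>
    if PySem.List.pyGetD l (i - j - 1) ' ' = '@' then false
    else if i - j = 0 ∨ PySem.List.pyGetD l (i - j - 1) ' ' = ' ' then true
    else pvAInner l i js

-- outer loop 'for i in range(len(s))'
def pvAOuter (l : List Char) : List Int → Bool
  | [] => false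
  | i :: is =>
    if PySem.Chars.lower (PySem.List.slice l (some i) (some (i + 3))) = ['d', 'o', 'g'] then
      if pvAInner l i (PySem.List.pyRange 0 (i + 1)) then true else pvAOuter l is
    else pvAOuter l is

def has_dog_ticker (s : String) : Bool :=
  pvAOuter s.toList (PySem.List.pyRange 0 (PySem.Chars.len s.toList))

-- ===== PORT B =====
-- single forward pass; lastAt / lastSpace are the indices of the last '@' / ' ' seen so far (-1 = none)
def pvBLoop (t : List Char) (lastAt lastSpace : Int) : List Int → Bool
  | [] => false
  | i :: is =>
    if PySem.List.slice t (some i) (some (i + 3)) = ['d', 'o', 'g'] ∧ lastAt ≤ lastSpace then true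
    else
      let c := PySem.List.pyGetD t i ' '
      if c = '@' then pvBLoop t i lastSpace is
      else if c = ' ' then pvBLoop t lastAt i is
      else pvBLoop t lastAt lastSpace is

def has_dog_ticker_alt (s : String) : Bool :=
  let t := PySem.Chars.lower s.toList
  pvBLoop t (-1) (-1) (PySem.List.pyRange 0 (PySem.Chars.len t))

-- ===== PRECONDITION & SPEC =====
-- helper used by D_: the word piece (up to the first '@') contains "dog"
def pvHasDog (w : List Char) : Prop := ['d', 'o', 'g'] <:+: w.takeWhile (· ≠ '@')

-- On strings ending in '@' whose only acceptable 'dog' occurrence is in a word starting at index 0 (no space-preceded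
-- occurrence), A's backward scan evaluates s[-1], wraps to the final '@' and returns False; B returns True, which is
-- intended since that trailing '@' is not in the word containing 'dog'.
def D_has_dog_ticker (s : String) : Prop :=
  let ws := (s.toList.map Char.toLower).splitOn ' '
  s.toList.getLast? = some '@' ∧ pvHasDog ws.headI ∧ ∀ w ∈ ws.tail, ¬ pvHasDog w
instance (s : String) : Decidable (D_has_dog_ticker s) := by unfold D_has_dog_ticker pvHasDog; infer_instance

def Spec_has_dog_ticker (s : String) (out : Bool) : Prop := ¬ D_has_dog_ticker s → out = has_dog_ticker_alt s
instance (s : String) (out : Bool) : Decidable (Spec_has_dog_ticker s out) := by unfold Spec_has_dog_ticker; infer_instance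

def pvDiffWitness_has_dog_ticker : String := "dog@"
def pvDiffWitnessOut_has_dog_ticker : Bool × Bool := (false, true)

-- ===== CLAIM (what is proved, stated in full; the proofs are below) =====
def Claim_unchanged_has_dog_ticker : Prop := ∀ (s : String), Dom_has_dog_ticker s → Spec_has_dog_ticker s (has_dog_ticker s)
def Claim_changed_has_dog_ticker : Prop := Dom_has_dog_ticker (pvDiffWitness_has_dog_ticker) ∧ D_has_dog_ticker (pvDiffWitness_has_dog_ticker) ∧ has_dog_ticker (pvDiffWitness_has_dog_ticker) = pvDiffWitnessOut_has_dog_ticker.1 ∧ has_dog_ticker_alt (pvDiffWitness_has_dog_ticker) = pvDiffWitnessOut_has_dog_ticker.2 ∧ pvDiffWitnessOut_has_dog_ticker.1 ≠ pvDiffWitnessOut_has_dog_ticker.2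
def Claim_exact_has_dog_ticker : Prop := ∀ (s : String), Dom_has_dog_ticker s → D_has_dog_ticker s → has_dog_ticker s ≠ has_dog_ticker_alt s

-- ===== LEMMAS AND PROOFS =====

-- separators and the first separator scanning backwards from position i (proof-side machinery)
def pvIsSep (c : Char) : Bool := c = '@' || c = ' '
def pvFirstSep (l : List Char) (i : Nat) : Option Char := ((l.take i).reverse).find? pvIsSep

-- A's inner-scan verdict, as a scan of the reversed prefix (the [] case is Python's s[-1] read at j = i)
def pvBackVerdict (l : List Char) : List Char → Bool
  | [] => !(l.getLast? == some '@')
  | c :: cs => if c = '@' then false else if c = ' ' then true else pvBackVerdict l cs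

-- per-occurrence verdicts of A and of B
def pvAVerd (l : List Char) (i : Nat) : Bool :=
  match pvFirstSep l i with
  | some c => decide (c = ' ')
  | none => !(l.getLast? == some '@')

def pvBValid (l : List Char) (i : Nat) : Bool :=
  match pvFirstSep l i with
  | some c => decide (c = ' ')
  | none => true

-- proof-side form of the occurrence test, matching A's slice-and-lower
def pvOccRef (l : List Char) (i : Nat) : Bool :=
  PySem.Chars.lower ((l.drop i).take 3) = ['d', 'o', 'g']

-- index of the last occurrence of c in t.take m, -1 if none
def pvLastIdx (t : List Char) (c : Char) : Nat → Int
  | 0 => -1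
  | k + 1 => if t.getD k ' ' = c then (k : Int) else pvLastIdx t c k

theorem pvLower_upper_toNat (c : Char) (hu : PySem.Chars.isupper c = true) :
    (PySem.Chars.lowerChar c).toNat = c.toNat + 32 ∧ 65 ≤ c.toNat ∧ c.toNat ≤ 90 := by
  have hb : 65 ≤ c.toNat ∧ c.toNat ≤ 90 := by
    simp [PySem.Chars.isupper, Char.le_def, UInt32.le_iff_toNat_le] at hu; exact hu
  refine ⟨?_, hb⟩
  simp only [PySem.Chars.lowerChar, hu, if_true]
  rw [Char.toNat_ofNat]
  have : Nat.isValidChar (c.toNat + 32) := by unfold Nat.isValidChar; omega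
  simp [this]

theorem pvToNat_ne (c : Char) (d : Char) (h : c.toNat ≠ d.toNat) : c ≠ d := by
  intro he; exact h (congrArg Char.toNat he)

theorem pvLowerChar_id (c : Char) (h : PySem.Chars.isupper c = false) : PySem.Chars.lowerChar c = c := by
  simp [PySem.Chars.lowerChar, h]

theorem pvToLower_eq (c : Char) : Char.toLower c = PySem.Chars.lowerChar c := by
  by_cases hu : PySem.Chars.isupper c = true
  · obtain ⟨h1, h2, h3⟩ := pvLower_upper_toNat c hu
    have hcond : c.val ≥ 'A'.val ∧ c.val ≤ 'Z'.val := by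
      simp only [PySem.Chars.isupper, Bool.and_eq_true, decide_eq_true_eq, Char.le_def] at hu
      exact ⟨hu.1, hu.2⟩
    have ht : (Char.toLower c).toNat = c.toNat + 32 := by
      unfold Char.toLower
      rw [dif_pos hcond]
      show (c.val + ('a'.val - 'A'.val)).toNat = c.toNat + 32
      have hv : c.val.toNat = c.toNat := rfl
      rw [UInt32.toNat_add]
      have h32 : ('a'.val - 'A'.val).toNat = 32 := by decide
      rw [h32, hv]
      apply Nat.mod_eq_of_lt
      omega
    apply Char.ext
    apply UInt32.toNat_inj.mp
    show (Char.toLower c).toNat = (PySem.Chars.lowerChar c).toNat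
    omega
  · have hncond : ¬ (c.val ≥ 'A'.val ∧ c.val ≤ 'Z'.val) := by
      intro hb
      apply hu
      simp only [PySem.Chars.isupper, Bool.and_eq_true, decide_eq_true_eq, Char.le_def]
      exact ⟨hb.1, hb.2⟩
    rw [pvLowerChar_id c (by simpa using hu)]
    unfold Char.toLower
    rw [dif_neg hncond]

theorem pvSep_of_upper (c : Char) (hu : PySem.Chars.isupper c = true) :
    pvIsSep c = false ∧ pvIsSep (PySem.Chars.lowerChar c) = false := by
  obtain ⟨h1, h2, h3⟩ := pvLower_upper_toNat c hu
  have e1 : PySem.Chars.lowerChar c ≠ '@' :=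
    pvToNat_ne _ _ (by rw [h1, show ('@').toNat = 64 from rfl]; omega)
  have e2 : PySem.Chars.lowerChar c ≠ ' ' :=
    pvToNat_ne _ _ (by rw [h1, show (' ').toNat = 32 from rfl]; omega)
  have e3 : c ≠ '@' := pvToNat_ne _ _ (by rw [show ('@').toNat = 64 from rfl]; omega)
  have e4 : c ≠ ' ' := pvToNat_ne _ _ (by rw [show (' ').toNat = 32 from rfl]; omega)
  simp [pvIsSep, e1, e2, e3, e4]

theorem pvIsSep_lower (c : Char) : pvIsSep (PySem.Chars.lowerChar c) = pvIsSep c := by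
  by_cases hu : PySem.Chars.isupper c = true
  · obtain ⟨a, b⟩ := pvSep_of_upper c hu; rw [a, b]
  · rw [pvLowerChar_id c (by simpa using hu)]

theorem pvLowerChar_of_sep (c : Char) (h : pvIsSep c = true) : PySem.Chars.lowerChar c = c := by
  by_cases hu : PySem.Chars.isupper c = true
  · rw [(pvSep_of_upper c hu).1] at h; cases h
  · exact pvLowerChar_id c (by simpa using hu)

theorem pvLowerChar_idem (c : Char) : PySem.Chars.lowerChar (PySem.Chars.lowerChar c) = PySem.Chars.lowerChar c := by
  by_cases hu : PySem.Chars.isupper c = true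
  · obtain ⟨h1, h2, h3⟩ := pvLower_upper_toNat c hu
    have hf : PySem.Chars.isupper (PySem.Chars.lowerChar c) = false := by
      apply Bool.eq_false_iff.mpr; intro habs
      have hb : 65 ≤ (PySem.Chars.lowerChar c).toNat ∧ (PySem.Chars.lowerChar c).toNat ≤ 90 := by
        simp [PySem.Chars.isupper, Char.le_def, UInt32.le_iff_toNat_le] at habs; exact habs
      omega
    exact pvLowerChar_id _ hf
  · rw [pvLowerChar_id c (by simpa using hu), pvLowerChar_id c (by simpa using hu)]

theorem pvFind?_map_lower (r : List Char) :
    (r.map PySem.Chars.lowerChar).find? pvIsSep = r.find? pvIsSep := by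
  induction r with
  | nil => rfl
  | cons c cs ih =>
    simp only [List.map_cons, List.find?_cons, pvIsSep_lower]
    cases hc : pvIsSep c with
    | false => exact ih
    | true => rw [pvLowerChar_of_sep c hc]

theorem pvLower_eq_map (l : List Char) : PySem.Chars.lower l = l.map PySem.Chars.lowerChar := rfl

theorem pvFirstSep_lower (l : List Char) (i : Nat) :
    pvFirstSep (PySem.Chars.lower l) i = pvFirstSep l i := by
  unfold pvFirstSep
  rw [pvLower_eq_map]
  have h1 : (List.take i (List.map PySem.Chars.lowerChar l)).reverse =
      List.map PySem.Chars.lowerChar ((List.take i l).reverse) := by simp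
  rw [h1, pvFind?_map_lower]

theorem pvLower_idem (l : List Char) : PySem.Chars.lower (PySem.Chars.lower l) = PySem.Chars.lower l := by
  simp [pvLower_eq_map, List.map_map, Function.comp_def, pvLowerChar_idem]

theorem pvOcc_iff (l : List Char) (i : Nat) :
    (['d', 'o', 'g'] <+: (l.map Char.toLower).drop i) ↔ pvOccRef l i = true := by
  unfold pvOccRef
  have hmap : l.map Char.toLower = PySem.Chars.lower l := by
    rw [pvLower_eq_map]
    exact List.map_congr_left (fun c _ => pvToLower_eq c)
  have hcomm : ((PySem.Chars.lower l).drop i).take 3 = PySem.Chars.lower ((l.drop i).take 3) := by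
    simp [pvLower_eq_map]
  rw [hmap, List.prefix_iff_eq_take, decide_eq_true_eq]
  constructor
  · intro h; exact hcomm.symm.trans h.symm
  · intro h; exact (hcomm.trans h).symm

theorem pvOccRef_lower (l : List Char) (i : Nat) : pvOccRef (PySem.Chars.lower l) i = pvOccRef l i := by
  unfold pvOccRef
  have h1 : List.take 3 (List.drop i (PySem.Chars.lower l)) =
      PySem.Chars.lower (List.take 3 (List.drop i l)) := by
    rw [pvLower_eq_map, pvLower_eq_map]; simp
  rw [h1, pvLower_idem]

theorem pvAInner_eq (l : List Char) (i : Nat) (hi : i < l.length) :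
    ∀ n, n ≤ i → pvAInner l (i : Int) (PySem.List.pyRange ((i - n : Nat) : Int) ((i : Int) + 1)) =
      pvBackVerdict l ((l.take n).reverse) := by
  intro n
  induction n with
  | zero =>
    intro _
    have hne : l ≠ [] := by intro h; rw [h] at hi; simp at hi
    rw [Nat.sub_zero, PySem.List.pyRange_one_singleton]
    show pvAInner l (i : Int) [(i : Int)] = _
    unfold pvAInner
    have hidx : (i : Int) - (i : Int) - 1 = -1 := by omega
    rw [hidx, PySem.List.pyGetD_neg_one l ' ' hne]
    simp only [List.take_zero, List.reverse_nil]
    unfold pvBackVerdict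
    rw [List.getLast?_eq_some_getLast hne]
    by_cases hc : l.getLast hne = '@'
    · simp [hc]
    · simp [hc]
  | succ n ih =>
    intro hn
    have hlt : ((i - (n + 1) : Nat) : Int) < (i : Int) + 1 := by omega
    rw [PySem.List.pyRange_one_cons hlt]
    unfold pvAInner
    have hidx : (i : Int) - ((i - (n + 1) : Nat) : Int) - 1 = ((n : Nat) : Int) := by omega
    have hnl : n < l.length := by omega
    rw [hidx, PySem.List.pyGetD_natCast, List.getD_eq_getElem l ' ' hnl]
    have hstep : ((i - (n + 1) : Nat) : Int) + 1 = ((i - n : Nat) : Int) := by omega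
    rw [hstep]
    have htake : (l.take (n + 1)).reverse = l[n] :: (l.take n).reverse := by
      rw [List.take_add_one, List.getElem?_eq_getElem hnl]
      simp
    rw [htake]
    have hnz : ¬ ((i : Int) - ((i - (n + 1) : Nat) : Int) = 0) := by omega
    unfold pvBackVerdict
    by_cases hat : l[n] = '@'
    · simp [hat]
    · by_cases hsp : l[n] = ' '
      · simp [hsp, hnz]
      · simp only [if_neg hat, if_neg hsp]
        rw [if_neg (fun h => h.elim hnz hsp)]
        exact ih (by omega)

theorem pvBackVerdict_eq (l r : List Char) :
    pvBackVerdict l r = (match r.find? pvIsSep with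
      | some c => decide (c = ' ')
      | none => !(l.getLast? == some '@')) := by
  induction r with
  | nil => rfl
  | cons c cs ih =>
    unfold pvBackVerdict
    rw [List.find?_cons]
    by_cases hat : c = '@'
    · simp [hat, pvIsSep]
    · by_cases hsp : c = ' '
      · simp [hsp, pvIsSep]
      · have : pvIsSep c = false := by simp [pvIsSep, hat, hsp]
        simp only [if_neg hat, if_neg hsp, this]
        exact ih

theorem pvAOuter_eq (l : List Char) :
    ∀ k m, m + k = l.length → pvAOuter l (PySem.List.pyRange ((m : Nat) : Int) ((l.length : Nat) : Int)) =
      (List.range' m k).any (fun i => pvOccRef l i && pvAVerd l i) := by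
  intro k
  induction k with
  | zero =>
    intro m hm
    rw [PySem.List.pyRange_one_eq_nil (by omega)]
    rfl
  | succ k ih =>
    intro m hm
    have hmlt : m < l.length := by omega
    rw [PySem.List.pyRange_one_cons (by omega)]
    unfold pvAOuter
    have hsl : PySem.List.slice l (some ((m : Nat) : Int)) (some (((m : Nat) : Int) + 3)) =
        (l.drop m).take 3 := by
      have h3 : ((m : Nat) : Int) + 3 = ((m : Nat) : Int) + ((3 : Nat) : Int) := by norm_num
      rw [h3, PySem.List.slice_natCast_add]
    rw [hsl]
    have hcons : ((m : Nat) : Int) + 1 = (((m + 1 : Nat)) : Int) := by omega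
    have hrest : pvAOuter l (PySem.List.pyRange (((m + 1 : Nat)) : Int) ((l.length : Nat) : Int)) =
        (List.range' (m + 1) k).any (fun i => pvOccRef l i && pvAVerd l i) := ih (m + 1) (by omega)
    have hinner : pvAInner l ((m : Nat) : Int) (PySem.List.pyRange 0 (((m : Nat) : Int) + 1)) =
        pvAVerd l m := by
      have h0 : ((0 : Nat) : Int) = ((m - m : Nat) : Int) := by omega
      have := pvAInner_eq l m hmlt m (le_refl m)
      rw [← h0] at this
      rw [show ((0 : Nat) : Int) = (0 : Int) from rfl] at this
      rw [this, pvBackVerdict_eq]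
      rfl
    rw [List.range'_succ, List.any_cons]
    by_cases hocc : PySem.Chars.lower ((l.drop m).take 3) = ['d', 'o', 'g']
    · rw [if_pos hocc, hinner, hcons, hrest]
      have hoccB : pvOccRef l m = true := by simp [pvOccRef, hocc]
      rw [hoccB]
      cases hv : pvAVerd l m
      · simp
      · simp
    · rw [if_neg hocc, hcons, hrest]
      have hoccB : pvOccRef l m = false := by simp [pvOccRef, hocc]
      rw [hoccB]
      simp

theorem pvLastIdx_lt (t : List Char) (c : Char) (m : Nat) :
    pvLastIdx t c m < (m : Int) ∧ -1 ≤ pvLastIdx t c m := by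
  induction m with
  | zero => unfold pvLastIdx; omega
  | succ k ih =>
    unfold pvLastIdx
    by_cases h : t.getD k ' ' = c
    · rw [if_pos h]; omega
    · rw [if_neg h]; omega

theorem pvLastIdx_le_iff (t : List Char) (m : Nat) (hm : m ≤ t.length) :
    decide (pvLastIdx t '@' m ≤ pvLastIdx t ' ' m) = pvBValid t m := by
  induction m with
  | zero => rfl
  | succ k ih =>
    have hk : k < t.length := by omega
    have htake : (t.take (k + 1)).reverse = t[k] :: (t.take k).reverse := by
      rw [List.take_add_one, List.getElem?_eq_getElem hk]
      simp
    have hget : t.getD k ' ' = t[k] := List.getD_eq_getElem t ' ' hk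
    have hA := pvLastIdx_lt t '@' k
    have hS := pvLastIdx_lt t ' ' k
    unfold pvLastIdx pvBValid pvFirstSep
    rw [htake, List.find?_cons, hget]
    by_cases hat : t[k] = '@'
    · have hsp : ¬ t[k] = ' ' := by rw [hat]; decide
      have hs : pvIsSep t[k] = true := by simp [pvIsSep, hat]
      rw [hs, if_pos hat, if_neg hsp]
      show decide (((k : Nat) : Int) ≤ pvLastIdx t ' ' k) = decide (t[k] = ' ')
      rw [decide_eq_false (by omega : ¬ (((k : Nat) : Int) ≤ pvLastIdx t ' ' k)),
        decide_eq_false hsp]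
    · by_cases hsp : t[k] = ' '
      · have hs : pvIsSep t[k] = true := by simp [pvIsSep, hsp]
        rw [hs, if_neg hat, if_pos hsp]
        show decide (pvLastIdx t '@' k ≤ ((k : Nat) : Int)) = decide (t[k] = ' ')
        rw [decide_eq_true (by omega : pvLastIdx t '@' k ≤ ((k : Nat) : Int)),
          decide_eq_true hsp]
      · have hs : pvIsSep t[k] = false := by simp [pvIsSep, hat, hsp]
        rw [hs, if_neg hat, if_neg hsp]
        have ih2 := ih (by omega)
        unfold pvBValid pvFirstSep at ih2
        exact ih2

theorem pvBLoop_eq (t : List Char) (ht : PySem.Chars.lower t = t) :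
    ∀ k m, m + k = t.length →
      pvBLoop t (pvLastIdx t '@' m) (pvLastIdx t ' ' m)
        (PySem.List.pyRange ((m : Nat) : Int) ((t.length : Nat) : Int)) =
      (List.range' m k).any (fun i => pvOccRef t i && pvBValid t i) := by
  intro k
  induction k with
  | zero =>
    intro m hm
    rw [PySem.List.pyRange_one_eq_nil (by omega)]
    rfl
  | succ k ih =>
    intro m hm
    have hmlt : m < t.length := by omega
    rw [PySem.List.pyRange_one_cons (by omega)]
    unfold pvBLoop
    have hsl : PySem.List.slice t (some ((m : Nat) : Int)) (some (((m : Nat) : Int) + 3)) =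
        (t.drop m).take 3 := by
      have h3 : ((m : Nat) : Int) + 3 = ((m : Nat) : Int) + ((3 : Nat) : Int) := by norm_num
      rw [h3, PySem.List.slice_natCast_add]
    rw [hsl]
    have hocct : PySem.Chars.lower ((t.drop m).take 3) = (t.drop m).take 3 := by
      have hcomm : PySem.Chars.lower (List.take 3 (List.drop m t)) =
          List.take 3 (List.drop m (PySem.Chars.lower t)) := by
        rw [pvLower_eq_map, pvLower_eq_map]; simp
      rw [hcomm, ht]
    have hoccB : ((t.drop m).take 3 = ['d', 'o', 'g']) ↔ pvOccRef t m = true := by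
      unfold pvOccRef
      rw [hocct]
      simp
    have hget : PySem.List.pyGetD t ((m : Nat) : Int) ' ' = t[m] := by
      rw [PySem.List.pyGetD_natCast]
      exact List.getD_eq_getElem t ' ' hmlt
    have hcons : ((m : Nat) : Int) + 1 = (((m + 1 : Nat)) : Int) := by omega
    have hAt : pvLastIdx t '@' (m + 1) =
        (if t.getD m ' ' = '@' then ((m : Nat) : Int) else pvLastIdx t '@' m) := rfl
    have hSp : pvLastIdx t ' ' (m + 1) =
        (if t.getD m ' ' = ' ' then ((m : Nat) : Int) else pvLastIdx t ' ' m) := rfl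
    have hgd : t.getD m ' ' = t[m] := List.getD_eq_getElem t ' ' hmlt
    rw [List.range'_succ, List.any_cons]
    by_cases hcond : (t.drop m).take 3 = ['d', 'o', 'g'] ∧ pvLastIdx t '@' m ≤ pvLastIdx t ' ' m
    · rw [if_pos hcond]
      have h1 : pvOccRef t m = true := hoccB.mp hcond.1
      have h2 : pvBValid t m = true := by
        rw [← pvLastIdx_le_iff t m (by omega)]
        exact decide_eq_true hcond.2
      rw [h1, h2]
      simp
    · rw [if_neg hcond]
      have hrest : ∀ a s, a = pvLastIdx t '@' (m + 1) → s = pvLastIdx t ' ' (m + 1) →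
          pvBLoop t a s (PySem.List.pyRange (((m + 1 : Nat)) : Int) ((t.length : Nat) : Int)) =
          (List.range' (m + 1) k).any (fun i => pvOccRef t i && pvBValid t i) := by
        intro a s ha hs
        rw [ha, hs]
        exact ih (m + 1) (by omega)
      have hmm : (pvOccRef t m && pvBValid t m) = false := by
        cases hocc2 : pvOccRef t m with
        | false => rfl
        | true =>
          cases hv : pvBValid t m with
          | false => rfl
          | true =>
            exfalso
            apply hcond
            refine ⟨hoccB.mpr hocc2, ?_⟩
            have hdec := pvLastIdx_le_iff t m (by omega)
            rw [hv] at hdec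
            exact of_decide_eq_true hdec
      rw [hmm, Bool.false_or]
      by_cases hat : PySem.List.pyGetD t ((m : Nat) : Int) ' ' = '@'
      · have hat' : t[m] = '@' := by rw [← hget]; exact hat
        have hsp' : ¬ t[m] = ' ' := by rw [hat']; decide
        rw [if_pos hat]
        apply hrest
        · rw [hAt, hgd, if_pos hat']
        · rw [hSp, hgd, if_neg hsp']
      · have hat' : ¬ t[m] = '@' := by rw [← hget]; exact hat
        rw [if_neg hat]
        by_cases hsp : PySem.List.pyGetD t ((m : Nat) : Int) ' ' = ' '
        · have hsp' : t[m] = ' ' := by rw [← hget]; exact hsp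
          rw [if_pos hsp]
          apply hrest
          · rw [hAt, hgd, if_neg hat']
          · rw [hSp, hgd, if_pos hsp']
        · have hsp' : ¬ t[m] = ' ' := by rw [← hget]; exact hsp
          rw [if_neg hsp]
          apply hrest
          · rw [hAt, hgd, if_neg hat']
          · rw [hSp, hgd, if_neg hsp']

theorem pvChars_len_eq (l : List Char) : PySem.Chars.len l = ((l.length : Nat) : Int) :=
  PySem.Chars.len_eq l

theorem hdA (s : String) :
    has_dog_ticker s = (List.range' 0 s.toList.length).any
      (fun i => pvOccRef s.toList i && pvAVerd s.toList i) := by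
  unfold has_dog_ticker
  rw [pvChars_len_eq]
  have := pvAOuter_eq s.toList s.toList.length 0 (by omega)
  rw [show (((0 : Nat)) : Int) = (0 : Int) from rfl] at this
  exact this

theorem hdB (s : String) :
    has_dog_ticker_alt s = (List.range' 0 s.toList.length).any
      (fun i => pvOccRef s.toList i && pvBValid s.toList i) := by
  unfold has_dog_ticker_alt
  show pvBLoop (PySem.Chars.lower s.toList) (-1) (-1)
      (PySem.List.pyRange 0 (PySem.Chars.len (PySem.Chars.lower s.toList))) = _
  rw [pvChars_len_eq]
  have hlen : (PySem.Chars.lower s.toList).length = s.toList.length := by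
    rw [pvLower_eq_map]; simp
  have h0 := pvBLoop_eq (PySem.Chars.lower s.toList) (pvLower_idem s.toList)
    (PySem.Chars.lower s.toList).length 0 (by omega)
  rw [show (((0 : Nat)) : Int) = (0 : Int) from rfl] at h0
  have ha : pvLastIdx (PySem.Chars.lower s.toList) '@' 0 = -1 := rfl
  have hs : pvLastIdx (PySem.Chars.lower s.toList) ' ' 0 = -1 := rfl
  rw [ha, hs] at h0
  rw [hlen] at h0
  rw [hlen, h0]
  refine congrArg (List.any (List.range' 0 s.toList.length)) (funext fun i => ?_)
  rw [pvOccRef_lower]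
  unfold pvBValid
  rw [pvFirstSep_lower]

theorem pvAny_iff (l : List Char) (f : Nat → Bool) :
    ((List.range' 0 l.length).any f = true) ↔ (∃ i, i < l.length ∧ f i = true) := by
  rw [List.any_eq_true]
  constructor
  · rintro ⟨i, hmem, hf⟩
    rw [List.mem_range'_1] at hmem
    exact ⟨i, by omega, hf⟩
  · rintro ⟨i, hlt, hf⟩
    exact ⟨i, by rw [List.mem_range'_1]; omega, hf⟩

theorem pvAVerd_iff (l : List Char) (i : Nat) :
    pvAVerd l i = true ↔ (pvFirstSep l i = some ' ' ∨ (pvFirstSep l i = none ∧ l.getLast? ≠ some '@')) := by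
  unfold pvAVerd
  cases h : pvFirstSep l i with
  | none => simp
  | some c =>
    simp only []
    constructor
    · intro hd
      exact Or.inl (congrArg some (of_decide_eq_true hd))
    · rintro (h2 | ⟨h2, -⟩)
      · injection h2 with hc; exact decide_eq_true hc
      · simp at h2

theorem pvBValid_iff (l : List Char) (i : Nat) :
    pvBValid l i = true ↔ (pvFirstSep l i = some ' ' ∨ pvFirstSep l i = none) := by
  unfold pvBValid
  cases h : pvFirstSep l i with
  | none => simp
  | some c =>
    simp only []
    constructor
    · intro hd
      exact Or.inl (congrArg some (of_decide_eq_true hd))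
    · rintro (h2 | h2)
      · injection h2 with hc; exact decide_eq_true hc
      · simp at h2

-- splitOn-to-index bridge

theorem pvFS_zero (L : List Char) : pvFirstSep L 0 = none := rfl

theorem pvFS_succ (c : Char) (L : List Char) (k : Nat) :
    pvFirstSep (c :: L) (k + 1) =
      (pvFirstSep L k).or (if pvIsSep c = true then some c else none) := by
  unfold pvFirstSep
  rw [List.take_succ_cons, List.reverse_cons, List.find?_append]
  congr 1
  cases hc : pvIsSep c <;> simp [List.find?_cons, hc]

theorem pvHeadI_splitOn (L : List Char) :
    ((L.splitOn ' ').headI) = L.takeWhile (fun x => !(x == ' ')) := by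
  induction L with
  | nil => rfl
  | cons c L ih =>
    by_cases hc : c = ' '
    · subst hc
      simp [List.splitOn, List.splitOnP_cons]
    · have hsplit : ((c :: L).splitOn ' ') = List.modifyHead (List.cons c) (L.splitOn ' ') := by
        simp [List.splitOn, List.splitOnP_cons, hc]
      obtain ⟨w0, ws, hw⟩ := List.exists_cons_of_ne_nil (List.splitOnP_ne_nil (fun x => x == ' ') L)
      have hw' : L.splitOn ' ' = w0 :: ws := hw
      rw [hsplit, hw', List.modifyHead_cons]
      rw [hw'] at ih
      simp only [List.headI] at ih ⊢
      rw [List.takeWhile_cons, if_pos (by simp [hc]), ih]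

theorem pvSplit_iff (L : List Char) :
    (pvHasDog ((L.splitOn ' ').headI) ↔
      ∃ i, i < L.length ∧ ['d', 'o', 'g'] <+: L.drop i ∧ pvFirstSep L i = none)
    ∧ ((∃ w ∈ (L.splitOn ' ').tail, pvHasDog w) ↔
      ∃ i, i < L.length ∧ ['d', 'o', 'g'] <+: L.drop i ∧ pvFirstSep L i = some ' ') := by
  induction L with
  | nil =>
    constructor
    · simp [pvHasDog, List.splitOn, List.splitOnP_nil]
    · simp [List.splitOn, List.splitOnP_nil]
  | cons c L ih =>
    obtain ⟨ih1, ih2⟩ := ih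
    obtain ⟨w0, ws, hw⟩ := List.exists_cons_of_ne_nil (List.splitOnP_ne_nil (fun x => x == ' ') L)
    have hw' : L.splitOn ' ' = w0 :: ws := hw
    by_cases hsp : c = ' '
    · subst hsp
      have hsplit : ((' ' :: L).splitOn ' ') = [] :: L.splitOn ' ' := by
        simp [List.splitOn, List.splitOnP_cons]
      have hsep : pvIsSep ' ' = true := by decide
      constructor
      · rw [hsplit]
        constructor
        · intro h; exact absurd h (by simp [pvHasDog, List.headI])
        · rintro ⟨i, hi, hd, hfs⟩
          exfalso
          match i with
          | 0 =>
            rw [List.drop_zero, List.cons_prefix_cons] at hd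
            exact absurd hd.1 (by decide)
          | k + 1 =>
            rw [pvFS_succ, if_pos hsep] at hfs
            cases h : pvFirstSep L k <;> rw [h] at hfs <;> simp [Option.or] at hfs
      · rw [hsplit]
        show (∃ w ∈ L.splitOn ' ', pvHasDog w) ↔ _
        constructor
        · rintro ⟨w, hmem, hdog⟩
          rw [hw'] at hmem
          rcases List.mem_cons.mp hmem with hh | ht
          · subst hh
            obtain ⟨k, hk, hkd, hkf⟩ := ih1.mp (by rw [hw']; exact hdog)
            exact ⟨k + 1, by simp only [List.length_cons] at *; omega, by simpa using hkd,
              by rw [pvFS_succ, if_pos hsep, hkf]; rfl⟩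
          · obtain ⟨k, hk, hkd, hkf⟩ := ih2.mp ⟨w, by rw [hw']; exact ht, hdog⟩
            exact ⟨k + 1, by simp only [List.length_cons] at *; omega, by simpa using hkd,
              by rw [pvFS_succ, if_pos hsep, hkf]; rfl⟩
        · rintro ⟨i, hi, hd, hfs⟩
          match i with
          | 0 => rw [pvFS_zero] at hfs; cases hfs
          | k + 1 =>
            rw [pvFS_succ, if_pos hsep] at hfs
            rw [List.drop_succ_cons] at hd
            cases h : pvFirstSep L k with
            | none =>
              have hdog : pvHasDog (L.splitOn ' ').headI := ih1.mpr ⟨k, by simp only [List.length_cons] at *; omega, hd, h⟩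
              exact ⟨(L.splitOn ' ').headI, by rw [hw']; exact List.mem_cons_self .., hdog⟩
            | some d =>
              rw [h] at hfs
              simp only [Option.or] at hfs
              obtain ⟨w, hmem, hdog⟩ := ih2.mpr ⟨k, by simp only [List.length_cons] at *; omega, hd, by rw [h, hfs]⟩
              rw [hw'] at hmem
              exact ⟨w, by rw [hw']; exact List.mem_cons_of_mem _ (by simpa using hmem), hdog⟩
    · have hsplit : ((c :: L).splitOn ' ') = List.modifyHead (List.cons c) (L.splitOn ' ') := by
        simp [List.splitOn, List.splitOnP_cons, hsp]
      have htail : ((c :: L).splitOn ' ').tail = (L.splitOn ' ').tail := by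
        rw [hsplit, List.tail_modifyHead]
      by_cases hat : c = '@'
      · subst hat
        have hsep : pvIsSep '@' = true := by decide
        constructor
        · constructor
          · intro h
            exfalso
            rw [hsplit, hw', List.modifyHead_cons] at h
            exact absurd h (by simp [pvHasDog, List.headI, List.takeWhile_cons])
          · rintro ⟨i, hi, hd, hfs⟩
            exfalso
            match i with
            | 0 =>
              rw [List.drop_zero, List.cons_prefix_cons] at hd
              exact absurd hd.1 (by decide)
            | k + 1 =>
              rw [pvFS_succ, if_pos hsep] at hfs
              cases h : pvFirstSep L k <;> rw [h] at hfs <;> simp [Option.or] at hfs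
        · rw [htail, ih2]
          constructor
          · rintro ⟨k, hk, hd, hfs⟩
            exact ⟨k + 1, by simp only [List.length_cons] at *; omega, by simpa using hd,
              by rw [pvFS_succ, if_pos hsep, hfs]; rfl⟩
          · rintro ⟨i, hi, hd, hfs⟩
            match i with
            | 0 => rw [pvFS_zero] at hfs; cases hfs
            | k + 1 =>
              rw [pvFS_succ, if_pos hsep] at hfs
              rw [List.drop_succ_cons] at hd
              cases h : pvFirstSep L k with
              | none => rw [h] at hfs; simp [Option.or] at hfs
              | some d =>
                rw [h] at hfs; simp only [Option.or] at hfs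
                exact ⟨k, by simp only [List.length_cons] at *; omega, hd, by rw [h, hfs]⟩
      · have hsep : pvIsSep c = false := by simp [pvIsSep, hsp, hat]
        have hor : ∀ k, pvFirstSep (c :: L) (k + 1) = pvFirstSep L k := by
          intro k
          rw [pvFS_succ, hsep]
          cases h : pvFirstSep L k <;> simp [Option.or]
        constructor
        · have hY : ((c :: L).splitOn ' ').headI.takeWhile (fun x => decide (x ≠ '@')) =
              c :: (L.splitOn ' ').headI.takeWhile (fun x => decide (x ≠ '@')) := by
            rw [hsplit, hw', List.modifyHead_cons]
            simp only [List.headI]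
            rw [List.takeWhile_cons, if_pos (by simp [hat])]
          have hOG : (['o', 'g'] <+: (L.splitOn ' ').headI.takeWhile (fun x => decide (x ≠ '@'))) ↔
              ['o', 'g'] <+: L := by
            constructor
            · intro h
              exact h.trans ((List.takeWhile_prefix _).trans
                (by rw [pvHeadI_splitOn]; exact List.takeWhile_prefix _))
            · intro h
              match L, h with
              | x :: L2, h =>
                rw [List.cons_prefix_cons] at h
                obtain ⟨hx, h2⟩ := h
                match L2, h2 with
                | y :: L3, h2 =>
                  rw [List.cons_prefix_cons] at h2
                  obtain ⟨hy, -⟩ := h2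
                  subst hx hy
                  rw [pvHeadI_splitOn]
                  simp [List.takeWhile_cons]
          unfold pvHasDog
          rw [hY, List.infix_cons_iff]
          constructor
          · rintro (h | h)
            · rw [List.cons_prefix_cons] at h
              refine ⟨0, by simp only [List.length_cons] at *; omega, ?_, pvFS_zero _⟩
              rw [List.drop_zero, List.cons_prefix_cons]
              exact ⟨h.1, hOG.mp h.2⟩
            · obtain ⟨k, hk, hd, hfs⟩ := ih1.mp h
              exact ⟨k + 1, by simp only [List.length_cons] at *; omega, by simpa using hd, by rw [hor, hfs]⟩
          · rintro ⟨i, hi, hd, hfs⟩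
            match i with
            | 0 =>
              rw [List.drop_zero, List.cons_prefix_cons] at hd
              left
              rw [List.cons_prefix_cons]
              exact ⟨hd.1, hOG.mpr hd.2⟩
            | k + 1 =>
              rw [hor] at hfs
              rw [List.drop_succ_cons] at hd
              exact Or.inr (ih1.mpr ⟨k, by simp only [List.length_cons] at *; omega, hd, hfs⟩)
        · rw [htail, ih2]
          constructor
          · rintro ⟨k, hk, hd, hfs⟩
            exact ⟨k + 1, by simp only [List.length_cons] at *; omega, by simpa using hd, by rw [hor, hfs]⟩
          · rintro ⟨i, hi, hd, hfs⟩
            match i with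
            | 0 => rw [pvFS_zero] at hfs; cases hfs
            | k + 1 =>
              rw [hor] at hfs
              rw [List.drop_succ_cons] at hd
              exact ⟨k, by simp only [List.length_cons] at *; omega, hd, hfs⟩

-- the three spec-level propositions
theorem pvD_iff (s : String) :
    D_has_dog_ticker s ↔
      (s.toList.getLast? = some '@'
        ∧ (∃ i, i < s.toList.length ∧ pvOccRef s.toList i = true ∧ pvFirstSep s.toList i = none)
        ∧ ¬ (∃ i, i < s.toList.length ∧ pvOccRef s.toList i = true ∧ pvFirstSep s.toList i = some ' ')) := by
  unfold D_has_dog_ticker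
  have hmap : s.toList.map Char.toLower = PySem.Chars.lower s.toList := by
    rw [pvLower_eq_map]
    exact List.map_congr_left (fun c _ => pvToLower_eq c)
  have hlen : (s.toList.map Char.toLower).length = s.toList.length := by simp
  have hFS : ∀ i, pvFirstSep (s.toList.map Char.toLower) i = pvFirstSep s.toList i := by
    intro i; rw [hmap, pvFirstSep_lower]
  have h1 := (pvSplit_iff (s.toList.map Char.toLower)).1
  have h2 := (pvSplit_iff (s.toList.map Char.toLower)).2
  have hocc : ∀ i, (['d', 'o', 'g'] <+: (s.toList.map Char.toLower).drop i) ↔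
      pvOccRef s.toList i = true := fun i => pvOcc_iff s.toList i
  constructor
  · rintro ⟨hlast, hhead, htail⟩
    refine ⟨hlast, ?_, ?_⟩
    · obtain ⟨i, hi, hd, hfs⟩ := h1.mp hhead
      exact ⟨i, by rw [← hlen]; exact hi, (hocc i).mp hd, by rw [← hFS]; exact hfs⟩
    · rintro ⟨i, hi, hd, hfs⟩
      obtain ⟨w, hmem, hdog⟩ := h2.mpr ⟨i, by rw [hlen]; exact hi, (hocc i).mpr hd, by rw [hFS]; exact hfs⟩
      exact htail w hmem hdog
  · rintro ⟨hlast, ⟨i, hi, hd, hfs⟩, hns⟩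
    refine ⟨hlast, ?_, ?_⟩
    · exact h1.mpr ⟨i, by rw [hlen]; exact hi, (hocc i).mpr hd, by rw [hFS]; exact hfs⟩
    · intro w hmem hdog
      obtain ⟨j, hj, hjd, hjf⟩ := h2.mp ⟨w, hmem, hdog⟩
      exact hns ⟨j, by rw [← hlen]; exact hj, (hocc j).mp hjd, by rw [← hFS]; exact hjf⟩

theorem pvA_iff (s : String) :
    has_dog_ticker s = true ↔
      ((∃ i, i < s.toList.length ∧ pvOccRef s.toList i = true ∧ pvFirstSep s.toList i = some ' ')
        ∨ ((∃ i, i < s.toList.length ∧ pvOccRef s.toList i = true ∧ pvFirstSep s.toList i = none)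
            ∧ s.toList.getLast? ≠ some '@')) := by
  rw [hdA, pvAny_iff]
  constructor
  · rintro ⟨i, hlt, hf⟩
    rw [Bool.and_eq_true] at hf
    rcases (pvAVerd_iff s.toList i).mp hf.2 with h | h
    · exact Or.inl ⟨i, hlt, hf.1, h⟩
    · exact Or.inr ⟨⟨i, hlt, hf.1, h.1⟩, h.2⟩
  · rintro (⟨i, hlt, ho, hf⟩ | ⟨⟨i, hlt, ho, hf⟩, hlast⟩)
    · exact ⟨i, hlt, by rw [Bool.and_eq_true]; exact ⟨ho, (pvAVerd_iff s.toList i).mpr (Or.inl hf)⟩⟩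
    · exact ⟨i, hlt, by rw [Bool.and_eq_true]; exact ⟨ho, (pvAVerd_iff s.toList i).mpr (Or.inr ⟨hf, hlast⟩)⟩⟩

theorem pvB_iff (s : String) :
    has_dog_ticker_alt s = true ↔
      ((∃ i, i < s.toList.length ∧ pvOccRef s.toList i = true ∧ pvFirstSep s.toList i = some ' ')
        ∨ (∃ i, i < s.toList.length ∧ pvOccRef s.toList i = true ∧ pvFirstSep s.toList i = none)) := by
  rw [hdB, pvAny_iff]
  constructor
  · rintro ⟨i, hlt, hf⟩
    rw [Bool.and_eq_true] at hf
    rcases (pvBValid_iff s.toList i).mp hf.2 with h | h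
    · exact Or.inl ⟨i, hlt, hf.1, h⟩
    · exact Or.inr ⟨i, hlt, hf.1, h⟩
  · rintro (⟨i, hlt, ho, hf⟩ | ⟨i, hlt, ho, hf⟩)
    · exact ⟨i, hlt, by rw [Bool.and_eq_true]; exact ⟨ho, (pvBValid_iff s.toList i).mpr (Or.inl hf)⟩⟩
    · exact ⟨i, hlt, by rw [Bool.and_eq_true]; exact ⟨ho, (pvBValid_iff s.toList i).mpr (Or.inr hf)⟩⟩

-- ===== VERDICT (by name: the statement is the Claim_ definition above) =====
theorem has_dog_ticker_spec : Claim_unchanged_has_dog_ticker := by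
  unfold Claim_unchanged_has_dog_ticker
  intro s _ hD
  rw [pvD_iff] at hD
  apply Bool.eq_iff_iff.mpr
  rw [pvA_iff, pvB_iff]
  by_cases hlast : s.toList.getLast? = some '@'
  · constructor
    · rintro (h | h)
      · exact Or.inl h
      · exact absurd hlast h.2
    · rintro (h | h)
      · exact Or.inl h
      · have hSP : ∃ i, i < s.toList.length ∧ pvOccRef s.toList i = true ∧
            pvFirstSep s.toList i = some ' ' := by
          by_contra hn
          exact hD ⟨hlast, h, hn⟩
        exact Or.inl hSP
  · constructor
    · rintro (h | h)
      · exact Or.inl h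
      · exact Or.inr h.1
    · rintro (h | h)
      · exact Or.inl h
      · exact Or.inr ⟨h, hlast⟩

theorem has_dog_ticker_changed : Claim_changed_has_dog_ticker := by
  unfold Claim_changed_has_dog_ticker; decide

theorem has_dog_ticker_tight : Claim_exact_has_dog_ticker := by
  unfold Claim_exact_has_dog_ticker
  intro s _ hD
  rw [pvD_iff] at hD
  obtain ⟨hlast, hSA, hnSP⟩ := hD
  have hA : has_dog_ticker s = false := by
    rcases Bool.eq_false_or_eq_true (has_dog_ticker s) with h | h
    · rcases (pvA_iff s).mp h with h2 | h2
      · exact absurd h2 hnSP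
      · exact absurd hlast h2.2
    · exact h
  have hB : has_dog_ticker_alt s = true := (pvB_iff s).mpr (Or.inr hSA)
  rw [hA, hB]
  decide
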